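-- pv_equiv track=rewrite | github.com/JavierCastellD/InitiationCodonMutationPredictor | src/machine_learning/initiationcodonpredictor.py | inverseCT
-- ===== SOURCE A (Python) =====
-- def inverseCT(bool_list):
--     positions = []
--     for n, e in enumerate(bool_list):
--         if e:
--             positions.append(n)
--
--     cats = []
--     for pos in positions:
--         if pos < 3:
--             cats.append('CDS_COORDS')
--         elif pos < 9:
--             cats.append('AMINOACID_CHANGE')
--         elif pos < 18:
--             cats.append('CODON_CHANGE')
--         elif pos < 20:
--             cats.append('READING_FRAME_STATUS')
--         elif pos < 22:
--             cats.append('PREMATURE_STOP_CODON')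
--         elif pos == 22:
--             cats.append('NMETS_5_UTR')
--         elif pos == 23:
--             cats.append('CONSERVED_N_METS')
--         elif pos == 24:
--             cats.append('LOST_METS_5_UTR')
--         elif pos == 25:
--             cats.append('CONSERVED_NO_STOP')
--         elif pos == 26:
--             cats.append('MET_POSITION')
--         elif pos == 27:
--             cats.append('STOP_CODON_POSITION')
--         elif pos == 28:
--             cats.append('MUTATED_SEQUENCE_LENGTH')
--
--     return set(cats)
-- ===== SOURCE B (Python) =====
-- # Category-driven inversion: scan each fixed category index range once with any()
-- # over the corresponding slice, instead of classifying every true position.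
-- RANGES = ((0, 3, 'CDS_COORDS'), (3, 9, 'AMINOACID_CHANGE'), (9, 18, 'CODON_CHANGE'),
--           (18, 20, 'READING_FRAME_STATUS'), (20, 22, 'PREMATURE_STOP_CODON'),
--           (22, 23, 'NMETS_5_UTR'), (23, 24, 'CONSERVED_N_METS'), (24, 25, 'LOST_METS_5_UTR'),
--           (25, 26, 'CONSERVED_NO_STOP'), (26, 27, 'MET_POSITION'),
--           (27, 28, 'STOP_CODON_POSITION'), (28, 29, 'MUTATED_SEQUENCE_LENGTH'))
--
-- def inverseCT(bool_list):
--     return {name for lo, hi, name in RANGES if any(bool_list[lo:hi])}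
-- ===== Notes on version B (the rewrite author's own statement) =====
-- stated objective: alternative
-- what changed: B inverts the traversal: instead of collecting every true position and classifying each through a 12-branch cascade, it iterates over a fixed table of 12 (lo, hi, name) category ranges and includes a name exactly when any() holds on the corresponding slice of the input.
import Mathlib
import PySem

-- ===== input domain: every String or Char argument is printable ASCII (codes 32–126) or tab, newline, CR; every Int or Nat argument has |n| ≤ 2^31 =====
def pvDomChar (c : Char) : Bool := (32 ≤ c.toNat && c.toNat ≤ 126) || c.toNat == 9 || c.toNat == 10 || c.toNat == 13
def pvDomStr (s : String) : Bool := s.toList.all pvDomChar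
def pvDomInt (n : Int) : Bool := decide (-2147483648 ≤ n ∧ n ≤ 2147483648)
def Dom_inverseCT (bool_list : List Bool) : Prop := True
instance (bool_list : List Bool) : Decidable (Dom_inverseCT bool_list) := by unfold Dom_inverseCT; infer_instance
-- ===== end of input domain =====

-- B inverts the traversal: instead of classifying each true position through a branch
-- cascade, it scans each of the 12 fixed category index ranges with any() over the slice
-- (alternative decomposition; same asymptotic cost).


-- ===== PORT A =====
def inverseCT (bool_list : List Bool) : List String :=
  let positions : List Int :=
    (PySem.List.enumerate bool_list).foldl
      (fun acc ne => if ne.2 then acc ++ [ne.1] else acc) []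
  let cats : List String :=
    positions.foldl (fun acc pos =>
      if pos < 3 then acc ++ ["CDS_COORDS"]
      else if pos < 9 then acc ++ ["AMINOACID_CHANGE"]
      else if pos < 18 then acc ++ ["CODON_CHANGE"]
      else if pos < 20 then acc ++ ["READING_FRAME_STATUS"]
      else if pos < 22 then acc ++ ["PREMATURE_STOP_CODON"]
      else if pos == 22 then acc ++ ["NMETS_5_UTR"]
      else if pos == 23 then acc ++ ["CONSERVED_N_METS"]
      else if pos == 24 then acc ++ ["LOST_METS_5_UTR"]
      else if pos == 25 then acc ++ ["CONSERVED_NO_STOP"]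
      else if pos == 26 then acc ++ ["MET_POSITION"]
      else if pos == 27 then acc ++ ["STOP_CODON_POSITION"]
      else if pos == 28 then acc ++ ["MUTATED_SEQUENCE_LENGTH"]
      else acc) []
  PySem.Set.ofList cats

-- ===== PORT B =====
def RANGES : List (Int × Int × String) :=
  [(0, 3, "CDS_COORDS"), (3, 9, "AMINOACID_CHANGE"), (9, 18, "CODON_CHANGE"),
   (18, 20, "READING_FRAME_STATUS"), (20, 22, "PREMATURE_STOP_CODON"),
   (22, 23, "NMETS_5_UTR"), (23, 24, "CONSERVED_N_METS"), (24, 25, "LOST_METS_5_UTR"),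
   (25, 26, "CONSERVED_NO_STOP"), (26, 27, "MET_POSITION"),
   (27, 28, "STOP_CODON_POSITION"), (28, 29, "MUTATED_SEQUENCE_LENGTH")]

-- {name for lo, hi, name in RANGES if any(bool_list[lo:hi])}: a set comprehension is a
-- fold of Set.add over the comprehension's iterable, guarded by its condition.
def inverseCT_alt (bool_list : List Bool) : List String :=
  RANGES.foldl
    (fun s r =>
      if (PySem.List.slice bool_list (some r.1) (some r.2.1)).any (fun b => b)
      then PySem.Set.add s r.2.2 else s)
    PySem.Set.empty

-- ===== PRECONDITION & SPEC =====
def Spec_inverseCT (bool_list : List Bool) (out : List String) : Prop := out = inverseCT_alt bool_list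
instance (bool_list : List Bool) (out : List String) : Decidable (Spec_inverseCT bool_list out) := by unfold Spec_inverseCT; infer_instance

-- ===== CLAIM (what is proved, stated in full; the proofs are below) =====
def Claim_equal_inverseCT : Prop := ∀ (bool_list : List Bool), Dom_inverseCT bool_list → Spec_inverseCT bool_list (inverseCT bool_list)

-- ===== LEMMAS AND PROOFS =====

/-- A's branch cascade, extracted as the list of categories appended for one position. -/
def catF (pos : Int) : List String :=
  if pos < 3 then ["CDS_COORDS"]
  else if pos < 9 then ["AMINOACID_CHANGE"]
  else if pos < 18 then ["CODON_CHANGE"]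
  else if pos < 20 then ["READING_FRAME_STATUS"]
  else if pos < 22 then ["PREMATURE_STOP_CODON"]
  else if pos == 22 then ["NMETS_5_UTR"]
  else if pos == 23 then ["CONSERVED_N_METS"]
  else if pos == 24 then ["LOST_METS_5_UTR"]
  else if pos == 25 then ["CONSERVED_NO_STOP"]
  else if pos == 26 then ["MET_POSITION"]
  else if pos == 27 then ["STOP_CODON_POSITION"]
  else if pos == 28 then ["MUTATED_SEQUENCE_LENGTH"]
  else []

/-- B's range table with the bounds as naturals (RANGES = RANGESN with bounds cast). -/
def RANGESN : List (Nat × Nat × String) :=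
  [(0, 3, "CDS_COORDS"), (3, 9, "AMINOACID_CHANGE"), (9, 18, "CODON_CHANGE"),
   (18, 20, "READING_FRAME_STATUS"), (20, 22, "PREMATURE_STOP_CODON"),
   (22, 23, "NMETS_5_UTR"), (23, 24, "CONSERVED_N_METS"), (24, 25, "LOST_METS_5_UTR"),
   (25, 26, "CONSERVED_NO_STOP"), (26, 27, "MET_POSITION"),
   (27, 28, "STOP_CODON_POSITION"), (28, 29, "MUTATED_SEQUENCE_LENGTH")]

/-- Classification of a position by a range table. -/
def catR : List (Nat × Nat × String) → Int → List String
  | [], _ => []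
  | r :: R, p => if (r.1 : Int) ≤ p ∧ p < (r.2.1 : Int) then [r.2.2] else catR R p

/-- The table is a contiguous increasing partition starting at `s`. -/
def chainFrom : Nat → List (Nat × Nat × String) → Prop
  | _, [] => True
  | s, r :: R => s = r.1 ∧ r.1 ≤ r.2.1 ∧ chainFrom r.2.1 R

lemma catsStep_eq (acc : List String) (pos : Int) :
    (if pos < 3 then acc ++ ["CDS_COORDS"]
      else if pos < 9 then acc ++ ["AMINOACID_CHANGE"]
      else if pos < 18 then acc ++ ["CODON_CHANGE"]
      else if pos < 20 then acc ++ ["READING_FRAME_STATUS"]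
      else if pos < 22 then acc ++ ["PREMATURE_STOP_CODON"]
      else if pos == 22 then acc ++ ["NMETS_5_UTR"]
      else if pos == 23 then acc ++ ["CONSERVED_N_METS"]
      else if pos == 24 then acc ++ ["LOST_METS_5_UTR"]
      else if pos == 25 then acc ++ ["CONSERVED_NO_STOP"]
      else if pos == 26 then acc ++ ["MET_POSITION"]
      else if pos == 27 then acc ++ ["STOP_CODON_POSITION"]
      else if pos == 28 then acc ++ ["MUTATED_SEQUENCE_LENGTH"]
      else acc) = acc ++ catF pos := by
  simp only [catF, apply_ite (fun l : List String => acc ++ l), List.append_nil]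

set_option maxHeartbeats 1600000 in
lemma catF_eq_catR (p : Int) (h0 : 0 ≤ p) : catF p = catR RANGESN p := by
  by_cases h29 : p < 29
  · lift p to ℕ using h0
    have h : p < 29 := by exact_mod_cast h29
    have hall : ∀ n ∈ List.range 29, catF (n : Int) = catR RANGESN (n : Int) := by decide
    exact hall p (List.mem_range.mpr h)
  · have hF : catF p = [] := by
      unfold catF
      rw [if_neg (by omega), if_neg (by omega), if_neg (by omega), if_neg (by omega),
          if_neg (by omega), if_neg (by simp only [beq_iff_eq]; omega),
          if_neg (by simp only [beq_iff_eq]; omega), if_neg (by simp only [beq_iff_eq]; omega),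
          if_neg (by simp only [beq_iff_eq]; omega), if_neg (by simp only [beq_iff_eq]; omega),
          if_neg (by simp only [beq_iff_eq]; omega), if_neg (by simp only [beq_iff_eq]; omega)]
    have hR : catR RANGESN p = [] := by
      unfold RANGESN
      rw [catR, if_neg (by push_cast; omega), catR, if_neg (by push_cast; omega),
          catR, if_neg (by push_cast; omega), catR, if_neg (by push_cast; omega),
          catR, if_neg (by push_cast; omega), catR, if_neg (by push_cast; omega),
          catR, if_neg (by push_cast; omega), catR, if_neg (by push_cast; omega),
          catR, if_neg (by push_cast; omega), catR, if_neg (by push_cast; omega),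
          catR, if_neg (by push_cast; omega), catR, if_neg (by push_cast; omega), catR]
    rw [hF, hR]

lemma flatMap_const {α : Type} (L : List α) (f : α → List String) (nm : String)
    (h : ∀ p ∈ L, f p = [nm]) : L.flatMap f = List.replicate L.length nm := by
  induction L with
  | nil => rfl
  | cons x L ih =>
    simp only [List.flatMap_cons, List.length_cons, List.replicate_succ,
      h x (by simp), ih (fun p hp => h p (by simp [hp]))]
    rfl

lemma foldl_add_mem (k : Nat) (s : List String) (nm : String) (h : nm ∈ s) :
    List.foldl PySem.Set.add s (List.replicate k nm) = s := by
  induction k with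
  | zero => rfl
  | succ k ih => simp only [List.replicate_succ, List.foldl_cons, PySem.Set.add_of_mem h, ih]

lemma foldl_add_replicate (k : Nat) (acc : List String) (nm : String) (h : nm ∉ acc) :
    List.foldl PySem.Set.add acc (List.replicate k nm) =
      if k = 0 then acc else acc ++ [nm] := by
  cases k with
  | zero => rfl
  | succ k =>
    simp only [List.replicate_succ, List.foldl_cons, PySem.Set.add_of_not_mem h,
      Nat.succ_ne_zero, ite_false]
    exact foldl_add_mem k _ nm (by simp)

lemma chain_lo_le (R : List (Nat × Nat × String)) : ∀ s, chainFrom s R → ∀ r ∈ R, s ≤ r.1 := by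
  induction R with
  | nil => intro s _ r hr; cases hr
  | cons r0 R ih =>
    intro s hc r hr
    obtain ⟨hs, hle, hc'⟩ := hc
    rcases List.mem_cons.mp hr with hr | hr
    · subst hr; omega
    · exact le_trans (by omega) (ih r0.2.1 hc' r hr)

lemma dropWhile_ge (c : Int) : ∀ (P : List Int), P.Pairwise (· < ·) →
    ∀ q ∈ P.dropWhile (fun p => decide (p < c)), c ≤ q := by
  intro P
  induction P with
  | nil => intro _ q hq; cases hq
  | cons p P ih =>
    intro hs q hq
    rw [List.pairwise_cons] at hs
    rw [List.dropWhile_cons] at hq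
    by_cases hp : p < c
    · rw [if_pos (by simpa using hp)] at hq
      exact ih hs.2 q hq
    · rw [if_neg (by simpa using hp)] at hq
      rcases List.mem_cons.mp hq with hq | hq
      · omega
      · have := hs.1 q hq; omega

/-- Main invariant: folding A's per-position categories through `Set.add` equals
B's range-driven fold, for a sorted position list lying at or above the table start. -/
lemma main_fold (R : List (Nat × Nat × String)) :
    ∀ (P : List Int) (acc : List String) (s : Nat),
    chainFrom s R → (∀ p ∈ P, (s : Int) ≤ p) → P.Pairwise (· < ·) →
    (R.map (fun r => r.2.2)).Nodup → (∀ r ∈ R, r.2.2 ∉ acc) →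
    List.foldl PySem.Set.add acc (P.flatMap (catR R)) =
      R.foldl
        (fun t r =>
          if P.any (fun p => decide ((r.1 : Int) ≤ p) && decide (p < (r.2.1 : Int)))
          then PySem.Set.add t r.2.2 else t) acc := by
  induction R with
  | nil =>
    intro P acc s _ _ _ _ _
    have hnilmap : P.flatMap (catR []) = [] := by
      have : catR [] = fun _ => ([] : List String) := rfl
      rw [this, List.flatMap_eq_nil_iff.mpr (fun _ _ => rfl)]
    simp [hnilmap]
  | cons r R ih =>
    intro P acc s hc hP hsort hnd hacc
    obtain ⟨lo, hi, nm⟩ := r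
    obtain ⟨hs, hlohi, hc'⟩ := hc
    rw [hs] at hP
    set P₁ := P.takeWhile (fun p => decide (p < (hi : Int))) with hP₁
    set P₂ := P.dropWhile (fun p => decide (p < (hi : Int))) with hP₂
    have hsplit : P₁ ++ P₂ = P := List.takeWhile_append_dropWhile
    have hmem₁ : ∀ p ∈ P₁, (lo : Int) ≤ p ∧ p < (hi : Int) := by
      intro p hp
      refine ⟨hP p (hsplit ▸ List.mem_append_left _ hp), ?_⟩
      have := List.mem_takeWhile_imp hp
      simpa using this
    have hmem₂ : ∀ p ∈ P₂, (hi : Int) ≤ p := dropWhile_ge _ P hsort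
    have hnm : nm ∉ acc := hacc (lo, hi, nm) (by simp)
    -- LHS
    have h1 : ∀ p ∈ P₁, catR ((lo, hi, nm) :: R) p = [nm] := by
      intro p hp
      simp only [catR]
      rw [if_pos (hmem₁ p hp)]
    have h2 : P₂.flatMap (catR ((lo, hi, nm) :: R)) = P₂.flatMap (catR R) := by
      refine List.flatMap_congr (fun p hp => ?_)
      simp only [catR]
      rw [if_neg (by have := hmem₂ p hp; omega)]
    have hLHS : List.foldl PySem.Set.add acc (P.flatMap (catR ((lo, hi, nm) :: R))) =
        List.foldl PySem.Set.add
          (if P₁.length = 0 then acc else acc ++ [nm]) (P₂.flatMap (catR R)) := by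
      rw [← hsplit, List.flatMap_append, List.foldl_append,
          flatMap_const P₁ _ nm h1, foldl_add_replicate _ _ _ hnm, h2]
    -- the new accumulator
    set acc' : List String := if P₁.length = 0 then acc else acc ++ [nm] with hacc'
    -- IH on the tail
    have hsort₂ : P₂.Pairwise (· < ·) := hsort.sublist (List.dropWhile_sublist _)
    have hih := ih P₂ acc' hi hc' hmem₂ hsort₂ (by simp only [List.map_cons, List.nodup_cons] at hnd; exact hnd.2)
      (by
        intro r' hr'
        have hne : r'.2.2 ≠ nm := by
          simp only [List.map_cons, List.nodup_cons, List.mem_map] at hnd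
          exact fun h => hnd.1 ⟨r', hr', h⟩
        have : r'.2.2 ∉ acc := hacc _ (by simp [hr'])
        by_cases h0 : P₁.length = 0 <;> simp [hacc', h0, this, hne])
    -- RHS head step
    have hcond : (P.any (fun p => decide ((lo : Int) ≤ p) && decide (p < (hi : Int))) = true)
        ↔ P₁ ≠ [] := by
      constructor
      · intro h
        obtain ⟨p, hp, hpc⟩ := List.any_eq_true.mp h
        simp only [Bool.and_eq_true, decide_eq_true_eq] at hpc
        intro h1'
        have hp2 : p ∈ P₂ := by
          rw [← hsplit, h1'] at hp; simpa using hp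
        have := hmem₂ p hp2; omega
      · intro h
        obtain ⟨p, hp⟩ := List.exists_mem_of_ne_nil _ h
        refine List.any_eq_true.mpr ⟨p, hsplit ▸ List.mem_append_left _ hp, ?_⟩
        have := hmem₁ p hp
        simp only [Bool.and_eq_true, decide_eq_true_eq]; omega
    have hstep : (if P.any (fun p => decide ((lo : Int) ≤ p) && decide (p < (hi : Int)))
        then PySem.Set.add acc nm else acc) = acc' := by
      by_cases h0 : P₁ = []
      · rw [if_neg (fun hh => (hcond.mp hh) h0)]
        simp [hacc', h0]
      · rw [if_pos (hcond.mpr h0), PySem.Set.add_of_not_mem hnm]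
        simp [hacc', List.length_eq_zero_iff, h0]
    -- tail congruence: ranges after the head only see P₂
    have hcongr : R.foldl
        (fun t r =>
          if P₂.any (fun p => decide ((r.1 : Int) ≤ p) && decide (p < (r.2.1 : Int)))
          then PySem.Set.add t r.2.2 else t) acc' =
        R.foldl
        (fun t r =>
          if P.any (fun p => decide ((r.1 : Int) ≤ p) && decide (p < (r.2.1 : Int)))
          then PySem.Set.add t r.2.2 else t) acc' := by
      refine PySem.List.foldl_congr_mem R _ _ acc' (fun t r' hr' => ?_)
      have hlo' : hi ≤ r'.1 := chain_lo_le R hi hc' r' hr'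
      have hany : P.any (fun p => decide ((r'.1 : Int) ≤ p) && decide (p < (r'.2.1 : Int))) =
          P₂.any (fun p => decide ((r'.1 : Int) ≤ p) && decide (p < (r'.2.1 : Int))) := by
        rw [← hsplit, List.any_append]
        have : P₁.any (fun p => decide ((r'.1 : Int) ≤ p) && decide (p < (r'.2.1 : Int))) = false := by
          rw [List.any_eq_false]
          intro p hp
          have := (hmem₁ p hp).2
          simp only [Bool.and_eq_true, decide_eq_true_eq, not_and]
          intro h'; exfalso; omega
        rw [this, Bool.false_or]
      rw [hany]
    rw [hLHS, List.foldl_cons, hstep, hih, hcongr]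

/-- any(bool_list[lo:hi]) is any over A's true-position list restricted to [lo, hi). -/
lemma any_slice (bl : List Bool) (lo hi : Nat) :
    (List.take (hi - lo) (List.drop lo bl)).any (fun b => b) =
    (((PySem.List.enumerate bl 0).filter (fun p => p.2)).map (fun p => p.1)).any
      (fun p => decide ((lo : Int) ≤ p) && decide (p < (hi : Int))) := by
  apply Bool.eq_iff_iff.mpr
  simp only [List.any_eq_true, List.mem_map, List.mem_filter,
    PySem.List.mem_enumerate_iff, Bool.and_eq_true, decide_eq_true_eq]
  constructor
  · rintro ⟨b, hb, hbt⟩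
    obtain ⟨i, hi', hval⟩ := List.mem_iff_getElem.mp hb
    have hlen : i < hi - lo ∧ lo + i < bl.length := by
      simp only [List.length_take, List.length_drop, lt_min_iff] at hi'; omega
    have hbl : bl[lo + i]'hlen.2 = true := by
      have := hval
      rw [List.getElem_take, List.getElem_drop] at this
      rw [this]; exact hbt
    exact ⟨((lo + i : Nat) : Int), ⟨⟨(lo + i, bl[lo + i]'hlen.2), ⟨⟨lo + i, hlen.2, by simp⟩,
      hbl⟩, rfl⟩, by push_cast; omega, by push_cast; omega⟩⟩
  · rintro ⟨q, ⟨⟨p, ⟨⟨k, hk, rfl⟩, hpt⟩, rfl⟩, hql, hqh⟩⟩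
    have hklo : lo ≤ k ∧ k < hi := by
      constructor <;> [exact_mod_cast (by simpa using hql); exact_mod_cast (by simpa using hqh)]
    have hidx : k - lo < (List.take (hi - lo) (List.drop lo bl)).length := by
      simp only [List.length_take, List.length_drop, lt_min_iff]; omega
    refine ⟨true, List.mem_iff_getElem.mpr ⟨k - lo, hidx, ?_⟩, rfl⟩
    rw [List.getElem_take, List.getElem_drop]
    have : lo + (k - lo) = k := by omega
    simp only [this]
    exact hpt

-- ===== VERDICT (by name: the statement is the Claim_ definition above) =====
theorem inverseCT_spec : Claim_equal_inverseCT := by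
  intro bl _
  show inverseCT bl = inverseCT_alt bl
  simp only [inverseCT, inverseCT_alt]
  rw [PySem.List.foldl_append_if (fun p : Int × Bool => p.2) (fun p => p.1)]
  simp only [catsStep_eq]
  rw [PySem.List.foldl_append_eq_flatMap catF]
  simp only [List.nil_append]
  rw [PySem.Set.ofList_eq_foldl]
  set P : List Int := ((PySem.List.enumerate bl 0).filter (fun p => p.2)).map (fun p => p.1)
    with hPdef
  have hP0 : ∀ q ∈ P, (0 : Int) ≤ q := by
    intro q hq
    rw [hPdef] at hq
    simp only [List.mem_map, List.mem_filter] at hq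
    obtain ⟨p, ⟨hpE, _⟩, rfl⟩ := hq
    obtain ⟨k, hk, rfl⟩ := (PySem.List.mem_enumerate_iff _ _ _).mp hpE
    simp
  have hsort : P.Pairwise (· < ·) := by
    rw [hPdef]
    exact List.pairwise_map.mpr ((PySem.List.pairwise_lt_enumerate bl 0).filter _)
  have hchain : chainFrom 0 RANGESN := by
    simp only [RANGESN, chainFrom]
    norm_num
  have hnd : (RANGESN.map (fun r => r.2.2)).Nodup := by decide
  rw [List.flatMap_congr (fun q hq => catF_eq_catR q (hP0 q hq))]
  rw [main_fold RANGESN P [] 0 hchain (by simpa using hP0) hsort hnd (by simp)]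
  rw [show RANGES = RANGESN.map (fun r => ((r.1 : Int), ((r.2.1 : Int), r.2.2))) from rfl,
      List.foldl_map]
  refine (PySem.List.foldl_congr_mem RANGESN _ _ _ (fun t r hr => ?_)).symm
  rw [PySem.List.slice_natCast, any_slice]
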